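-- pv_equiv track=rewrite | github.com/ZebcoWeb/Player-Tracker | modules/utils/functions.py | small_letter
-- ===== SOURCE A (Python) =====
-- def small_letter(text: str) -> str:
--     string = text.lower()
--     dict = {
--         'a': 'ᴀ',
--         'b': 'ʙ',
--         'c': 'ᴄ',
--         'd': 'ᴅ',
--         'e': 'ᴇ',
--         'f': 'ꜰ',
--         'g': 'ɢ',
--         'h': 'ʜ',
--         'i': 'ɪ',
--         'j': 'ᴊ',
--         'k': 'ᴋ',
--         'l': 'ʟ',
--         'm': 'ᴍ',
--         'n': 'ɴ',
--         'o': 'ᴏ',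
--         'p': 'ᴘ',
--         'q': 'ǫ',
--         'r': 'ʀ',
--         's': 'ꜱ',
--         't': 'ᴛ',
--         'u': 'ᴜ',
--         'v': 'ᴠ',
--         'w': 'ᴡ',
--         'x': 'x',
--         'y': 'ʏ',
--         'z': 'ᴢ',
--     }
--
--     for char in string:
--         if char in dict:
--             string = string.replace(char, dict[char])
--     return string
-- ===== SOURCE B (Python) =====
-- _SMALLS = "\u1d00\u0299\u1d04\u1d05\u1d07\ua730\u0262\u029c\u026a\u1d0a\u1d0b\u029f\u1d0d\u0274\u1d0f\u1d18\u01eb\u0280\ua731\u1d1b\u1d1c\u1d20\u1d21x\u028f\u1d22"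
--
-- def small_letter(text: str) -> str:
--     return ''.join(_SMALLS[ord(c) - 97] if 'a' <= c <= 'z' else c
--                    for c in text.lower())
-- ===== Notes on version B (the rewrite author's own statement) =====
-- stated objective: faster
-- what changed: Replaced A's loop of full-string str.replace calls keyed by a dict with a single pass that maps each lowered character through a 26-character indexed string via ord(c)-97 arithmetic (no dict, no rescans).
import Mathlib
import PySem

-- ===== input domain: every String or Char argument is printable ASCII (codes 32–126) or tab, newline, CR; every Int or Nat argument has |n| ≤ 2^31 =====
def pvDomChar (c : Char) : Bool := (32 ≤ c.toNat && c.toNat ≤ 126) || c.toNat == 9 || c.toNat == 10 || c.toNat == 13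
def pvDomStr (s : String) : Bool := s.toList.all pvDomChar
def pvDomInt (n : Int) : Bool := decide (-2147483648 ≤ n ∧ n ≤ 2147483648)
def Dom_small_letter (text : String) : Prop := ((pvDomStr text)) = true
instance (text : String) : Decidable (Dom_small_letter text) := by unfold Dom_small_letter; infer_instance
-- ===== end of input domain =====

-- B replaces A's per-letter loop of full-string str.replace calls (keyed by a dict) by a
-- single pass mapping each lowered character through a 26-character string indexed by
-- ord(c)-97 (faster: one pass, no rescans).

-- ===== PORT A =====
-- A's dict literal: lowercase ASCII letters to small-caps characters ('x' maps to itself).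
def smallDict : PySem.Dict Char Char := PySem.Dict.ofList
  [('a', 'ᴀ'), ('b', 'ʙ'), ('c', 'ᴄ'), ('d', 'ᴅ'), ('e', 'ᴇ'), ('f', 'ꜰ'),
   ('g', 'ɢ'), ('h', 'ʜ'), ('i', 'ɪ'), ('j', 'ᴊ'), ('k', 'ᴋ'), ('l', 'ʟ'),
   ('m', 'ᴍ'), ('n', 'ɴ'), ('o', 'ᴏ'), ('p', 'ᴘ'), ('q', 'ǫ'), ('r', 'ʀ'),
   ('s', 'ꜱ'), ('t', 'ᴛ'), ('u', 'ᴜ'), ('v', 'ᴠ'), ('w', 'ᴡ'), ('x', 'x'),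
   ('y', 'ʏ'), ('z', 'ᴢ')]

-- string = text.lower(); for char in string (the lowered snapshot):
--   if char in dict: string = string.replace(char, dict[char]); return string
def small_letter (text : String) : String :=
  let string := PySem.Chars.lower text.toList
  String.ofList (string.foldl (fun s c =>
    match smallDict.get? c with
    | some v => PySem.Chars.replace s [c] [v]
    | none => s) string)

-- ===== PORT B =====
-- B's 26-character lookup string _SMALLS
def pvSmalls : List Char := "ᴀʙᴄᴅᴇꜰɢʜɪᴊᴋʟᴍɴᴏᴘǫʀꜱᴛᴜᴠᴡxʏᴢ".toList

-- ''.join(_SMALLS[ord(c)-97] if 'a' <= c <= 'z' else c for c in text.lower())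
-- getD is exact here: the guard makes the Python index 0..25, always in range.
def small_letter_alt (text : String) : String :=
  String.ofList ((PySem.Chars.lower text.toList).map fun c =>
    if 'a' ≤ c ∧ c ≤ 'z' then pvSmalls.getD (c.toNat - 97) c else c)

-- ===== PRECONDITION & SPEC =====
def Spec_small_letter (text : String) (out : String) : Prop := out = small_letter_alt text
instance (text : String) (out : String) : Decidable (Spec_small_letter text out) := by unfold Spec_small_letter; infer_instance

-- ===== CLAIM =====
def Claim_equal_small_letter : Prop := ∀ (text : String), Dom_small_letter text → Spec_small_letter text (small_letter text)

-- ===== LEMMAS AND PROOFS =====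

-- A's dict as an association list (proof-side only)
def smallPairs : List (Char × Char) :=
  [('a', 'ᴀ'), ('b', 'ʙ'), ('c', 'ᴄ'), ('d', 'ᴅ'), ('e', 'ᴇ'), ('f', 'ꜰ'),
   ('g', 'ɢ'), ('h', 'ʜ'), ('i', 'ɪ'), ('j', 'ᴊ'), ('k', 'ᴋ'), ('l', 'ʟ'),
   ('m', 'ᴍ'), ('n', 'ɴ'), ('o', 'ᴏ'), ('p', 'ᴘ'), ('q', 'ǫ'), ('r', 'ʀ'),
   ('s', 'ꜱ'), ('t', 'ᴛ'), ('u', 'ᴜ'), ('v', 'ᴠ'), ('w', 'ᴡ'), ('x', 'x'),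
   ('y', 'ʏ'), ('z', 'ᴢ')]

def smallMap (x : Char) : Option Char :=
  (smallPairs.find? (fun p => p.1 == x)).map (·.2)

-- B's per-character action, as a named function for the proofs
def bAct (c : Char) : Char :=
  if 'a' ≤ c ∧ c ≤ 'z' then pvSmalls.getD (c.toNat - 97) c else c

-- the effect of one iteration of A's loop on a single character of the string
def step1 (x c : Char) : Char :=
  match smallDict.get? c with
  | some v => if x = c then v else x
  | none => x

lemma smallDict_eq : smallDict = PySem.Dict.mk smallPairs := by decide

lemma get?_eq_find (ps : List (Char × Char)) (x : Char) :
    (PySem.Dict.mk ps).get? x = (ps.find? (fun p => p.1 == x)).map (·.2) := by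
  induction ps with
  | nil => simp [PySem.Dict.get?]
  | cons p t ih =>
      rw [show (p :: t) = ((p.1, p.2) :: t) from by rfl]
      rw [PySem.Dict.get?_mk_cons, List.find?_cons]
      by_cases h : p.1 == x
      · simp [h]
      · simp only [h]
        simp [ih]

lemma get?_small (x : Char) : smallDict.get? x = smallMap x := by
  rw [smallDict_eq, get?_eq_find]; rfl

-- replace.go with a single-character pattern is a pointwise map (given enough fuel)
lemma go_single (c d : Char) : ∀ (l : List Char) (fuel : Nat) (acc : List Char),
    l.length ≤ fuel →
    PySem.Chars.replace.go [c] [d] fuel l acc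
      = acc.reverse ++ l.map (fun x => if x = c then d else x) := by
  intro l
  induction l with
  | nil =>
      intro fuel acc _
      cases fuel <;> simp [PySem.Chars.replace.go]
  | cons x t ih =>
      intro fuel acc hf
      cases fuel with
      | zero => simp at hf
      | succ f =>
          rw [PySem.Chars.replace.go]
          by_cases hx : c = x
          · subst hx
            rw [if_pos (by simp [List.isPrefixOf])]
            rw [show List.drop [c].length (c :: t) = t from by simp]
            rw [ih f _ (by simpa using hf)]
            simp
          · rw [if_neg (by simp [List.isPrefixOf]; exact hx)]
            rw [ih f _ (by simpa using hf)]
            simp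
            exact fun h => (hx h.symm).elim

lemma replace_single (s : List Char) (c d : Char) :
    PySem.Chars.replace s [c] [d] = s.map (fun x => if x = c then d else x) := by
  rw [PySem.Chars.replace]
  rw [if_neg (by simp)]
  rw [go_single c d s s.length [] le_rfl]
  simp

-- A's fold over the whole string is the map of the per-character fold
lemma foldl_stepA (chs : List Char) : ∀ (s : List Char),
    chs.foldl (fun s c =>
      match smallDict.get? c with
      | some v => PySem.Chars.replace s [c] [v]
      | none => s) s
    = s.map (fun x => chs.foldl step1 x) := by
  induction chs with
  | nil => intro s; simp
  | cons c t ih =>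
      intro s
      have hstep : (match smallDict.get? c with
          | some v => PySem.Chars.replace s [c] [v]
          | none => s) = s.map (fun x => step1 x c) := by
        cases h : smallDict.get? c with
        | none => simp [step1, h]
        | some v => simp [replace_single, step1, h]
      simp only [List.foldl_cons, hstep, ih, List.map_map]
      rfl

-- every value of A's dict is a fixed point of A's own lookup
lemma vals_stable : ∀ p ∈ smallPairs, (smallMap p.2).getD p.2 = p.2 := by decide

lemma map_stable {x v c w : Char} (h : smallMap x = some v) (hc : smallMap c = some w)
    (hvc : v = c) : w = v := by
  subst hvc
  obtain ⟨p, hp, hpv⟩ : ∃ p, smallPairs.find? (fun q => q.1 == x) = some p ∧ p.2 = v := by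
    unfold smallMap at h
    cases hf : smallPairs.find? (fun q => q.1 == x) with
    | none => rw [hf] at h; cases h
    | some p => rw [hf] at h; exact ⟨p, rfl, by simpa using h⟩
  have hmem := List.mem_of_find?_eq_some hp
  have hk := vals_stable p hmem
  rw [hpv, hc] at hk
  simpa using hk

lemma step1_of_none {x : Char} (h : smallMap x = none) (c : Char) : step1 x c = x := by
  unfold step1
  rw [get?_small]
  cases hc : smallMap c with
  | none => rfl
  | some w =>
      simp only []
      by_cases he : x = c
      · subst he; rw [h] at hc; cases hc
      · simp [he]

lemma step1_of_ne {x c : Char} (h : x ≠ c) : step1 x c = x := by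
  unfold step1
  rw [get?_small]
  cases smallMap c <;> simp [h]

lemma step1_stable {x v : Char} (h : smallMap x = some v) (c : Char) : step1 v c = v := by
  unfold step1
  rw [get?_small]
  cases hc : smallMap c with
  | none => rfl
  | some w =>
      simp only []
      by_cases he : v = c
      · rw [if_pos he]; exact map_stable h hc he
      · simp [he]

lemma fold_of_none {x : Char} (h : smallMap x = none) (chs : List Char) :
    chs.foldl step1 x = x := by
  induction chs with
  | nil => rfl
  | cons c t ih => rw [List.foldl_cons, step1_of_none h, ih]

lemma fold_stable {x v : Char} (h : smallMap x = some v) (chs : List Char) :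
    chs.foldl step1 v = v := by
  induction chs with
  | nil => rfl
  | cons c t ih => rw [List.foldl_cons, step1_stable h, ih]

lemma fold_hit {x v : Char} (h : smallMap x = some v) (chs : List Char) (hm : x ∈ chs) :
    chs.foldl step1 x = v := by
  induction chs with
  | nil => simp at hm
  | cons c t ih =>
      rw [List.foldl_cons]
      by_cases he : x = c
      · subst he
        have : step1 x x = v := by
          unfold step1; rw [get?_small, h]; simp
        rw [this, fold_stable h]
      · rw [step1_of_ne he]
        exact ih ((List.mem_cons.mp hm).resolve_left he)

-- bridge to B: A's lookup agrees with B's arithmetic table on every character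
def pvLetters : List Char :=
  ['a','b','c','d','e','f','g','h','i','j','k','l','m','n','o','p','q','r','s','t','u','v','w','x','y','z']

lemma keys_range : ∀ p ∈ smallPairs, 'a' ≤ p.1 ∧ p.1 ≤ 'z' := by decide

lemma mem_letters {x : Char} (h1 : 'a' ≤ x) (h2 : x ≤ 'z') : x ∈ pvLetters := by
  have hn : x.toNat ∈ pvLetters.map Char.toNat := by
    have he : pvLetters.map Char.toNat = List.range' 97 26 := by decide
    rw [he, List.mem_range'_1]
    have l1 : (97 : Nat) ≤ x.toNat := h1
    have l2 : x.toNat ≤ 122 := h2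
    omega
  obtain ⟨c, hc, hcx⟩ := List.mem_map.mp hn
  have hv : c.val = x.val := UInt32.toNat_inj.mp hcx
  have hcx2 : c = x := Char.ext hv
  exact hcx2 ▸ hc

lemma letters_agree : ∀ c ∈ pvLetters, (smallMap c).getD c = bAct c := by
  intro c hc
  fin_cases hc <;> rfl

lemma map_eq_bAct (x : Char) : (smallMap x).getD x = bAct x := by
  by_cases h : 'a' ≤ x ∧ x ≤ 'z'
  · exact letters_agree x (mem_letters h.1 h.2)
  · have hfind : smallPairs.find? (fun p => p.1 == x) = none := by
      rw [List.find?_eq_none]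
      intro p hp
      simp only [beq_iff_eq]
      intro he
      exact h (he ▸ keys_range p hp)
    unfold smallMap bAct
    rw [hfind, if_neg h]
    rfl

-- a character of the iterated string ends up exactly at B's image of it
lemma fold_eq_bAct {x : Char} (chs : List Char) (hm : x ∈ chs) :
    chs.foldl step1 x = bAct x := by
  cases h : smallMap x with
  | none =>
      rw [← map_eq_bAct, h]
      simpa using fold_of_none h chs
  | some v =>
      rw [← map_eq_bAct, h]
      simpa using fold_hit h chs hm

-- ===== VERDICT =====
theorem small_letter_spec : Claim_equal_small_letter := by
  intro text _
  unfold Spec_small_letter small_letter small_letter_alt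
  show String.ofList (List.foldl (fun s c =>
      match smallDict.get? c with
      | some v => PySem.Chars.replace s [c] [v]
      | none => s) (PySem.Chars.lower text.toList) (PySem.Chars.lower text.toList))
    = String.ofList (List.map (fun c =>
      if 'a' ≤ c ∧ c ≤ 'z' then pvSmalls.getD (c.toNat - 97) c else c) (PySem.Chars.lower text.toList))
  congr 1
  rw [foldl_stepA]
  exact List.map_congr_left (fun x hx => fold_eq_bAct _ hx)
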